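-- pv_equiv track=rewrite | github.com/forsun71-png/decision-reset-api | streamlit_demo_app.py | group_signals
-- ===== SOURCE A (Python) =====
-- def group_signals(signals: list[str]) -> dict:
--     groups = {
--         "확신 위험": [],
--         "편향 위험": [],
--         "기억 위험": [],
--     }
--
--     confidence = {
--         "overconfidence",
--         "single_path_judgment",
--         "lack_of_alternatives",
--         "repetition_pattern",
--         "intensifier",
--     }
--     bias = {
--         "group_generalization",
--         "hostile_attribution",
--         "political_bias_frame",
--     }
--     memory = {
--         "memory_fixation",
--         "counterevidence_block",
--         "past_anchor",
--         "current_omission",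
--         "no_suspension",
--         "memory_to_conclusion",
--     }
--
--     for sig in signals:
--         if sig in confidence:
--             groups["확신 위험"].append(sig)
--         elif sig in bias:
--             groups["편향 위험"].append(sig)
--         elif sig in memory:
--             groups["기억 위험"].append(sig)
--
--     return groups
-- ===== SOURCE B (Python) =====
-- def group_signals(signals: list[str]) -> dict:
--     confidence = {
--         "overconfidence",
--         "single_path_judgment",
--         "lack_of_alternatives",
--         "repetition_pattern",
--         "intensifier",
--     }
--     bias = {
--         "group_generalization",
--         "hostile_attribution",
--         "political_bias_frame",
--     }
--     memory = {
--         "memory_fixation",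
--         "counterevidence_block",
--         "past_anchor",
--         "current_omission",
--         "no_suspension",
--         "memory_to_conclusion",
--     }
--     return {
--         "확신 위험": [s for s in signals if s in confidence],
--         "편향 위험": [s for s in signals if s in bias],
--         "기억 위험": [s for s in signals if s in memory],
--     }
-- ===== Notes on version B (the rewrite author's own statement) =====
-- stated objective: simpler
-- what changed: Replaces the single pass that dispatches each signal through an if/elif cascade into mutable buckets with three independent filter passes (one comprehension per category), built directly into the returned dict literal; correct because the three category sets are pairwise disjoint, so each bucket is exactly the order-preserving filter of signals by its own set.
import Mathlib
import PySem

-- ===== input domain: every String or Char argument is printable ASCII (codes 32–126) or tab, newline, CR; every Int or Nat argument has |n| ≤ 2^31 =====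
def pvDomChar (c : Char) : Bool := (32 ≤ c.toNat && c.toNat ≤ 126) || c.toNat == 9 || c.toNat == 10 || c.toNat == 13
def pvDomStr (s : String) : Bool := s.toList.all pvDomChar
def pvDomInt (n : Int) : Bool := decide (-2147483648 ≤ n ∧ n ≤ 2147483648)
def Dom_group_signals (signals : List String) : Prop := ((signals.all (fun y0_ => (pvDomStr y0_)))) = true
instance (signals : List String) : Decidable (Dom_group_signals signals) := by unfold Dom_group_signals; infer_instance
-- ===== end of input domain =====

-- B replaces the one-pass if/elif bucket dispatch with three independent filter passes,
-- one per category (simpler; valid since the category sets are pairwise disjoint).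

-- ===== PORT A =====
def gsConfidence : PySem.Set String := PySem.Set.ofList
  ["overconfidence", "single_path_judgment", "lack_of_alternatives", "repetition_pattern", "intensifier"]
def gsBias : PySem.Set String := PySem.Set.ofList
  ["group_generalization", "hostile_attribution", "political_bias_frame"]
def gsMemory : PySem.Set String := PySem.Set.ofList
  ["memory_fixation", "counterevidence_block", "past_anchor", "current_omission", "no_suspension", "memory_to_conclusion"]

-- groups[k].append(sig) is Dict.modify k [] (· ++ [sig]); exact here since all three keys are present.
def group_signals (signals : List String) : List (String × List String) :=
  let groups : PySem.Dict String (List String) :=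
    PySem.Dict.ofList [("확신 위험", []), ("편향 위험", []), ("기억 위험", [])]
  let groups := signals.foldl (fun g sig =>
    if PySem.Set.contains gsConfidence sig then g.modify "확신 위험" [] (· ++ [sig])
    else if PySem.Set.contains gsBias sig then g.modify "편향 위험" [] (· ++ [sig])
    else if PySem.Set.contains gsMemory sig then g.modify "기억 위험" [] (· ++ [sig])
    else g) groups
  groups.items

-- ===== PORT B =====
def gsConfidenceB : PySem.Set String := PySem.Set.ofList
  ["overconfidence", "single_path_judgment", "lack_of_alternatives", "repetition_pattern", "intensifier"]
def gsBiasB : PySem.Set String := PySem.Set.ofList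
  ["group_generalization", "hostile_attribution", "political_bias_frame"]
def gsMemoryB : PySem.Set String := PySem.Set.ofList
  ["memory_fixation", "counterevidence_block", "past_anchor", "current_omission", "no_suspension", "memory_to_conclusion"]

-- each '[s for s in signals if s in cat]' is List.filter; the dict literal of three fresh keys is the items list.
def group_signals_alt (signals : List String) : List (String × List String) :=
  [("확신 위험", signals.filter (fun s => PySem.Set.contains gsConfidenceB s)),
   ("편향 위험", signals.filter (fun s => PySem.Set.contains gsBiasB s)),
   ("기억 위험", signals.filter (fun s => PySem.Set.contains gsMemoryB s))]

-- ===== PRECONDITION & SPEC =====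
def Spec_group_signals (signals : List String) (out : List (String × List String)) : Prop := out = group_signals_alt signals
instance (signals : List String) (out : List (String × List String)) : Decidable (Spec_group_signals signals out) := by unfold Spec_group_signals; infer_instance

-- ===== CLAIM (what is proved, stated in full; the proofs are below) =====
def Claim_equal_group_signals : Prop := ∀ (signals : List String), Dom_group_signals signals → Spec_group_signals signals (group_signals signals)

-- ===== LEMMAS AND PROOFS =====

-- disjointness of the three category sets
theorem gs_conf_not_bias (s : String) (h : PySem.Set.contains gsConfidence s = true) :
    PySem.Set.contains gsBias s = false := by
  rw [PySem.Set.contains_iff, show gsConfidence = (["overconfidence", "single_path_judgment", "lack_of_alternatives", "repetition_pattern", "intensifier"] : List String) from rfl] at h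
  simp only [List.mem_cons, List.not_mem_nil, or_false] at h
  repeat' rcases h with rfl | h
  all_goals decide
theorem gs_conf_not_mem (s : String) (h : PySem.Set.contains gsConfidence s = true) :
    PySem.Set.contains gsMemory s = false := by
  rw [PySem.Set.contains_iff, show gsConfidence = (["overconfidence", "single_path_judgment", "lack_of_alternatives", "repetition_pattern", "intensifier"] : List String) from rfl] at h
  simp only [List.mem_cons, List.not_mem_nil, or_false] at h
  repeat' rcases h with rfl | h
  all_goals decide
theorem gs_bias_not_mem (s : String) (h : PySem.Set.contains gsBias s = true) :
    PySem.Set.contains gsMemory s = false := by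
  rw [PySem.Set.contains_iff, show gsBias = (["group_generalization", "hostile_attribution", "political_bias_frame"] : List String) from rfl] at h
  simp only [List.mem_cons, List.not_mem_nil, or_false] at h
  repeat' rcases h with rfl | h
  all_goals decide

-- the modify steps on the concrete three-key dict
theorem gs_mod1 (l1 l2 l3 : List String) (s : String) :
    (PySem.Dict.mk [("확신 위험", l1), ("편향 위험", l2), ("기억 위험", l3)]).modify "확신 위험" [] (· ++ [s])
    = PySem.Dict.mk [("확신 위험", l1 ++ [s]), ("편향 위험", l2), ("기억 위험", l3)] := rfl
theorem gs_mod2 (l1 l2 l3 : List String) (s : String) :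
    (PySem.Dict.mk [("확신 위험", l1), ("편향 위험", l2), ("기억 위험", l3)]).modify "편향 위험" [] (· ++ [s])
    = PySem.Dict.mk [("확신 위험", l1), ("편향 위험", l2 ++ [s]), ("기억 위험", l3)] := rfl
theorem gs_mod3 (l1 l2 l3 : List String) (s : String) :
    (PySem.Dict.mk [("확신 위험", l1), ("편향 위험", l2), ("기억 위험", l3)]).modify "기억 위험" [] (· ++ [s])
    = PySem.Dict.mk [("확신 위험", l1), ("편향 위험", l2), ("기억 위험", l3 ++ [s])] := rfl

-- loop invariant: the fold extends each bucket by the filter of the remaining signals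
theorem gs_inv (sigs : List String) (l1 l2 l3 : List String) :
    (sigs.foldl (fun g sig =>
      if PySem.Set.contains gsConfidence sig then g.modify "확신 위험" [] (· ++ [sig])
      else if PySem.Set.contains gsBias sig then g.modify "편향 위험" [] (· ++ [sig])
      else if PySem.Set.contains gsMemory sig then g.modify "기억 위험" [] (· ++ [sig])
      else g) (PySem.Dict.mk [("확신 위험", l1), ("편향 위험", l2), ("기억 위험", l3)])).items
    = [("확신 위험", l1 ++ sigs.filter (fun s => PySem.Set.contains gsConfidence s)),
       ("편향 위험", l2 ++ sigs.filter (fun s => PySem.Set.contains gsBias s)),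
       ("기억 위험", l3 ++ sigs.filter (fun s => PySem.Set.contains gsMemory s))] := by
  induction sigs generalizing l1 l2 l3 with
  | nil => simp
  | cons s r ih =>
    simp only [List.foldl_cons, List.filter_cons]
    by_cases h1 : PySem.Set.contains gsConfidence s = true
    · rw [h1, if_pos rfl, gs_mod1, ih, gs_conf_not_bias s h1, gs_conf_not_mem s h1]
      simp
    · rw [Bool.not_eq_true] at h1
      rw [h1]
      by_cases h2 : PySem.Set.contains gsBias s = true
      · rw [h2, if_neg (by simp), if_pos rfl, gs_mod2, ih, gs_bias_not_mem s h2]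
        simp
      · rw [Bool.not_eq_true] at h2
        rw [h2]
        by_cases h3 : PySem.Set.contains gsMemory s = true
        · rw [h3, if_neg (by simp), if_neg (by simp), if_pos rfl, gs_mod3, ih]
          simp
        · rw [Bool.not_eq_true] at h3
          rw [h3, if_neg (by simp), if_neg (by simp), if_neg (by simp), ih]
          simp

-- ===== VERDICT (by name: the statement is the Claim_ definition above) =====
theorem group_signals_spec : Claim_equal_group_signals := by
  intro signals _
  unfold Spec_group_signals group_signals group_signals_alt
  simp only []
  have h := gs_inv signals [] [] []
  simpa [gsConfidenceB, gsBiasB, gsMemoryB, gsConfidence, gsBias, gsMemory] using h
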